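-- pv_equiv track=rewrite | github.com/thuanhong/farcry_data_science_introduction | main.py | take_list_player
-- ===== SOURCE A (Python) =====
-- def take_list_player(frags, column1, column2, player):
--     list_longest = []
--     list_current = []
--     for frag in frags:
--         if len(frag) == 2:
--             continue
--         if frag[column2] == player:
--             if len(list_current) > len(list_longest):
--                 list_longest = list_current.copy()
--             list_current.clear()
--         elif frag[column1] == player:
--             frag = list(frag)
--             if column1 < column2:
--                 list_current.append(frag[0:1]+frag[2:])
--             else:
--                 list_current.append(frag[0:2]+frag[-1:])
--     return list_longest
-- ===== SOURCE B (Python) =====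
-- def _event(frag, column1, column2, player):
--     # classify one log line: None = irrelevant, "death" = player died, else transformed kill row
--     if len(frag) == 2:
--         return None
--     if frag[column2] == player:
--         return "death"
--     if frag[column1] == player:
--         f = list(frag)
--         return f[0:1] + f[2:] if column1 < column2 else f[0:2] + f[-1:]
--     return None
--
--
-- def take_list_player(frags, column1, column2, player):
--     events = [e for f in frags
--               for e in [_event(f, column1, column2, player)] if e is not None]
--     # split into completed segments back-to-front; kills after the last death are dropped
--     segments = []
--     for e in reversed(events):
--         if e == "death":
--             segments.insert(0, [])
--         elif segments:
--             segments[0].insert(0, e)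
--     return max(segments, key=len) if segments else []
-- ===== Notes on version B (the rewrite author's own statement) =====
-- stated objective: alternative
-- what changed: B is a staged pipeline: first map each line to an event (skip / death / transformed kill row), then split the event stream back-to-front into completed segments (dropping the open trailing streak), then pick the first longest with max(key=len), instead of A's single loop with a running-best and a mutable current list.
import Mathlib
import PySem

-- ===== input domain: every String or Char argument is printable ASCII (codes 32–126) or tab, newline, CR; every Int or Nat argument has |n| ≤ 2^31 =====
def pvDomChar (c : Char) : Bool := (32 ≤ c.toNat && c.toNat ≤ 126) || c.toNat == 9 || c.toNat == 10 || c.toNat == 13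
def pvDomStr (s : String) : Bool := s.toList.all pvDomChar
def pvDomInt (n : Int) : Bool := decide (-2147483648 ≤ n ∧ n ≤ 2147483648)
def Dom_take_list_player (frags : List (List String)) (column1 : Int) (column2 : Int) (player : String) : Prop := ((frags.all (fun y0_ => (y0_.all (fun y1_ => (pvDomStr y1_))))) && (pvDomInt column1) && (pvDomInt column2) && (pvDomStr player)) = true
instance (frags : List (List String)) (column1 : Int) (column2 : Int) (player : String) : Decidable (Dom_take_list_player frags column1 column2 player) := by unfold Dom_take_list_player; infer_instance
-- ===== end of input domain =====

-- B is a staged pipeline (map lines to events, split the event stream into completed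
-- segments back-to-front, pick the first longest at the end) instead of A's single
-- running-best loop; equivalent on all non-raising inputs.


-- ===== PORT A =====
-- loop body of A: state = (list_longest, list_current)
def stepA (column1 column2 : Int) (player : String)
    (st : List (List String) × List (List String)) (frag : List String) :
    List (List String) × List (List String) :=
  if frag.length = 2 then st
  else if PySem.List.pyGetD frag column2 "" = player then
    (if st.2.length > st.1.length then st.2 else st.1, [])
  else if PySem.List.pyGetD frag column1 "" = player then
    (st.1, st.2 ++ [if column1 < column2 then
        PySem.List.slice frag (some 0) (some 1) ++ PySem.List.slice frag (some 2) none
      else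
        PySem.List.slice frag (some 0) (some 2) ++ PySem.List.slice frag (some (-1)) none])
  else st

def take_list_player (frags : List (List String)) (column1 : Int) (column2 : Int) (player : String) : List (List String) :=
  (frags.foldl (stepA column1 column2 player) ([], [])).1

-- ===== PORT B =====
-- _event of Source B: none = irrelevant line, some none = the player died ("death"),
-- some (some row) = a kill by the player, transformed
def eventB (column1 column2 : Int) (player : String) (frag : List String) :
    Option (Option (List String)) :=
  if frag.length = 2 then none
  else if PySem.List.pyGetD frag column2 "" = player then some none
  else if PySem.List.pyGetD frag column1 "" = player then
    some (some (if column1 < column2 then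
        PySem.List.slice frag (some 0) (some 1) ++ PySem.List.slice frag (some 2) none
      else
        PySem.List.slice frag (some 0) (some 2) ++ PySem.List.slice frag (some (-1)) none))
  else none

-- Source B's back-to-front splitting loop: one step per event, processed right-to-left (foldr)
def segStep (e : Option (List String)) (segs : List (List (List String))) :
    List (List (List String)) :=
  match e with
  | none => [] :: segs
  | some r =>
    match segs with
    | [] => []               -- kill after the last death: dropped
    | s :: ss => (r :: s) :: ss

def take_list_player_alt (frags : List (List String)) (column1 : Int) (column2 : Int) (player : String) : List (List String) :=
  match (frags.filterMap (eventB column1 column2 player)).foldr segStep [] with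
  | [] => []
  | s :: rest =>               -- max(segments, key=len): first maximum
      rest.foldl (fun best x => if x.length > best.length then x else best) s

-- ===== PRECONDITION & SPEC =====
-- Pre_ excludes exactly the inputs where Python A raises IndexError: a frag of length ≠ 2 whose
-- column2 index is out of range, or whose column2 cell misses the player while column1 is out of
-- range (the "x" default of the total lookup is irrelevant: the InRange conjunct makes it exact).
def Pre_take_list_player (frags : List (List String)) (column1 : Int) (column2 : Int) (player : String) : Prop :=
  ∀ frag ∈ frags, frag.length ≠ 2 →
    PySem.Raise.InRange frag.length column2 ∧
      (PySem.List.pyGetD frag column2 "x" ≠ player → PySem.Raise.InRange frag.length column1)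
instance (frags : List (List String)) (column1 : Int) (column2 : Int) (player : String) : Decidable (Pre_take_list_player frags column1 column2 player) := by unfold Pre_take_list_player; infer_instance

def pvWitness_take_list_player : List (List String) × Int × Int × String :=
  ([["p", "x", "w1"], ["p", "y", "w2"], ["x", "p", "w3"], ["q", "q", "w4"]], 0, 1, "p")

def Spec_take_list_player (frags : List (List String)) (column1 : Int) (column2 : Int) (player : String) (out : List (List String)) : Prop := out = take_list_player_alt frags column1 column2 player
instance (frags : List (List String)) (column1 : Int) (column2 : Int) (player : String) (out : List (List String)) : Decidable (Spec_take_list_player frags column1 column2 player out) := by unfold Spec_take_list_player; infer_instance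

-- ===== CLAIM (what is proved, stated in full; the proofs are below) =====
def Claim_equal_take_list_player : Prop := ∀ (frags : List (List String)) (column1 : Int) (column2 : Int) (player : String), Dom_take_list_player frags column1 column2 player → Pre_take_list_player frags column1 column2 player → Spec_take_list_player frags column1 column2 player (take_list_player frags column1 column2 player)

-- ===== LEMMAS AND PROOFS =====

-- A's running-best update, as a binary operation
def pick (best s : List (List String)) : List (List String) :=
  if s.length > best.length then s else best

theorem pick_nil (s : List (List String)) : pick [] s = s := by
  cases s <;> simp [pick]

-- prepend A's pending current list onto the first completed segment (if any)
def glue (cur : List (List String)) (segs : List (List (List String))) :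
    List (List (List String)) :=
  match segs with
  | [] => []
  | s :: ss => (cur ++ s) :: ss

theorem glue_nil (segs : List (List (List String))) : glue [] segs = segs := by
  cases segs <;> simp [glue]

-- the central invariant: A's fold from (best, cur) equals picking through B's segments glued with cur
theorem fold_eq (column1 column2 : Int) (player : String) :
    ∀ (frags : List (List String)) (best cur : List (List String)),
    (frags.foldl (stepA column1 column2 player) (best, cur)).1
      = (glue cur ((frags.filterMap (eventB column1 column2 player)).foldr segStep [])).foldl
          pick best := by
  intro frags
  induction frags with
  | nil => intro best cur; simp [glue]
  | cons f fs ih =>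
    intro best cur
    rw [List.foldl_cons, List.filterMap_cons]
    by_cases h1 : f.length = 2
    · rw [show eventB column1 column2 player f = none from by simp [eventB, h1],
          show stepA column1 column2 player (best, cur) f = (best, cur) from by simp [stepA, h1]]
      exact ih best cur
    · by_cases h2 : PySem.List.pyGetD f column2 "" = player
      · rw [show eventB column1 column2 player f = some none from by simp [eventB, h1, h2],
            show stepA column1 column2 player (best, cur) f = (pick best cur, []) from by
              simp [stepA, h1, h2, pick]]
        simp only [List.foldr_cons, segStep]
        rw [ih (pick best cur) [], glue_nil]
        simp [glue, List.foldl_cons]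
      · by_cases h3 : PySem.List.pyGetD f column1 "" = player
        · obtain ⟨r, he, hsA⟩ :
            ∃ r, eventB column1 column2 player f = some (some r) ∧
              stepA column1 column2 player (best, cur) f = (best, cur ++ [r]) :=
            ⟨if column1 < column2 then
                PySem.List.slice f (some 0) (some 1) ++ PySem.List.slice f (some 2) none
              else PySem.List.slice f (some 0) (some 2) ++ PySem.List.slice f (some (-1)) none,
              by simp [eventB, h1, h2, h3], by simp [stepA, h1, h2, h3]⟩
          rw [he, hsA]
          simp only [List.foldr_cons, segStep]
          rw [ih best (cur ++ [r])]
          cases hs : (fs.filterMap (eventB column1 column2 player)).foldr segStep [] with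
          | nil => simp [glue]
          | cons s ss => simp [glue]
        · rw [show eventB column1 column2 player f = none from by simp [eventB, h1, h2, h3],
              show stepA column1 column2 player (best, cur) f = (best, cur) from by
                simp [stepA, h1, h2, h3]]
          exact ih best cur

-- the final max(segments, key=len) equals folding pick from the empty list
theorem foldl_pick_nil_eq (l : List (List (List String))) :
    l.foldl pick [] =
      (match l with
       | [] => []
       | s :: rest => rest.foldl (fun best x => if x.length > best.length then x else best) s) := by
  cases l with
  | nil => rfl
  | cons s rest =>
    simp only [List.foldl_cons, pick_nil]
    rfl

-- ===== VERDICT (by name: the statement is the Claim_ definition above) =====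
theorem take_list_player_spec : Claim_equal_take_list_player := by
  intro frags column1 column2 player _dom _pre
  unfold Spec_take_list_player take_list_player take_list_player_alt
  rw [fold_eq, glue_nil, foldl_pick_nil_eq]
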